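-- pv_equiv track=rewrite | github.com/kkowenn/algorirhm-design | Final/AlgFinal1-2021/Q7-Minimal Damage/minimalDamageQ7.py | damage
-- ===== SOURCE A (Python) =====
-- def damage(x):
--     if len(x) <= 3:
--         return 0
--     else:
--         tempsum = []
--         tempdam = []
--         for i in range(len(x)):
--             re = 0
--             dam = []
--
--             if i == len(x) - 2: # 23
--                 dam = x[1:i]
--
--             elif i == len(x) - 1: # 50
--                 dam = x[2:i]
--
--             else:
--                 dam = x[:i] + x[i+3:]
--
--             tempsum.append(sum(dam))
--             tempdam.append(dam)
--
--          # find minimum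
--         xmin = min(tempsum)
--         indexmin = tempsum.index(xmin)
--         xdam = tempdam[indexmin]
--
--         return xmin + damage(xdam)
-- ===== SOURCE B (Python) =====
-- def damage(x):
--     total_removed = 0
--     while len(x) > 3:
--         n = len(x)
--         # prefix sums: pre[i] = sum of x[:i]
--         pre = [0]
--         for v in x:
--             pre.append(pre[-1] + v)
--         total = pre[n]
--         # remainder sums for every removal window (the last two wrap around)
--         rems = [total - pre[i + 3] + pre[i] for i in range(n - 2)]
--         rems.append(pre[n - 2] - pre[1])
--         rems.append(pre[n - 1] - pre[2])
--         m = min(rems)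
--         j = rems.index(m)
--         if j <= n - 3:
--             x = x[:j] + x[j + 3:]
--         elif j == n - 2:
--             x = x[1:j]
--         else:
--             x = x[2:j]
--         total_removed += m
--     return total_removed
-- ===== Notes on version B (the rewrite author's own statement) =====
-- stated objective: faster
-- what changed: Each level now computes all n candidate remainder sums from one prefix-sum array in O(n) (never materialising the n candidate lists), and the recursion is replaced by an iterative loop with an accumulator that rebuilds only the one chosen remainder list.
import Mathlib
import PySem

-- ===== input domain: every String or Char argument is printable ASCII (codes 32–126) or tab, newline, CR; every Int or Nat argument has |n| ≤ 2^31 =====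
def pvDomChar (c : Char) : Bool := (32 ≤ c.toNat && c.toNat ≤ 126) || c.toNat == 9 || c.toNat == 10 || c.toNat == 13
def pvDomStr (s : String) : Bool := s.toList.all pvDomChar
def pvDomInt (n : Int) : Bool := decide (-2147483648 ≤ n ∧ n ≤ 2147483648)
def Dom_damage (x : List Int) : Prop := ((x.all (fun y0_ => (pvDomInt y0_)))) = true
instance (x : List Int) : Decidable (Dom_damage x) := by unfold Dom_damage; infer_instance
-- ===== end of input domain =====

-- B replaces A's per-candidate list rebuilding (O(n^2) per level) by one prefix-sum pass per
-- level (O(n) per level) and an iterative accumulator loop: O(n^2) total instead of O(n^3).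

-- ===== PORT A =====
-- fuel = initial list length; each level shrinks the list by 3, so fuel never runs out
def damageAGo : Nat → List Int → Int
  | 0, _ => 0
  | f+1, x =>
    if x.length ≤ 3 then 0
    else
      let n : Int := (x.length : Int)
      let tempdam : List (List Int) := (PySem.List.pyRange 0 n 1).map (fun i =>
        if i = n - 2 then PySem.List.slice x (some 1) (some i)
        else if i = n - 1 then PySem.List.slice x (some 2) (some i)
        else PySem.List.slice x none (some i) ++ PySem.List.slice x (some (i+3)) none)
      let tempsum : List Int := tempdam.map List.sum
      let xmin : Int := (PySem.List.min? tempsum (fun v => v)).getD 0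
      let indexmin : Nat := (PySem.List.index? tempsum xmin).getD 0
      let xdam : List Int := (PySem.List.pyGet? tempdam (indexmin : Int)).getD []
      xmin + damageAGo f xdam

def damage (x : List Int) : Int := damageAGo x.length x

-- ===== PORT B =====
def damageBGo : Nat → List Int → Int → Int
  | 0, _, acc => acc
  | f+1, x, acc =>
    if x.length ≤ 3 then acc
    else
      let n : Int := (x.length : Int)
      let pre : List Int := x.foldl (fun p v => p ++ [(PySem.List.pyGet? p (-1)).getD 0 + v]) [0]
      let total : Int := (PySem.List.pyGet? pre n).getD 0
      let rems : List Int :=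
        ((PySem.List.pyRange 0 (n-2) 1).map (fun i =>
          total - (PySem.List.pyGet? pre (i+3)).getD 0 + (PySem.List.pyGet? pre i).getD 0))
        ++ [(PySem.List.pyGet? pre (n-2)).getD 0 - (PySem.List.pyGet? pre 1).getD 0]
        ++ [(PySem.List.pyGet? pre (n-1)).getD 0 - (PySem.List.pyGet? pre 2).getD 0]
      let m : Int := (PySem.List.min? rems (fun v => v)).getD 0
      let j : Nat := (PySem.List.index? rems m).getD 0
      let x' : List Int :=
        if (j : Int) ≤ n - 3 then
          PySem.List.slice x none (some (j : Int)) ++ PySem.List.slice x (some ((j : Int)+3)) none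
        else if (j : Int) = n - 2 then PySem.List.slice x (some 1) (some (j : Int))
        else PySem.List.slice x (some 2) (some (j : Int))
      damageBGo f x' (acc + m)

def damage_alt (x : List Int) : Int := damageBGo x.length x 0

-- ===== PRECONDITION & SPEC =====
def Spec_damage (x : List Int) (out : Int) : Prop := out = damage_alt x
instance (x : List Int) (out : Int) : Decidable (Spec_damage x out) := by unfold Spec_damage; infer_instance

-- ===== CLAIM (what is proved, stated in full; the proofs are below) =====
def Claim_equal_damage : Prop := ∀ (x : List Int), Dom_damage x → Spec_damage x (damage x)

-- ===== LEMMAS AND PROOFS =====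

lemma seg_sum (x : List Int) (a b : Nat) (h : a ≤ b) :
    ((x.drop a).take (b - a)).sum = (x.take b).sum - (x.take a).sum := by
  have hb : x.take b = x.take a ++ (x.drop a).take (b - a) := by
    conv_lhs => rw [show b = a + (b - a) by omega]
    rw [List.take_add]
  rw [hb, List.sum_append]; ring

lemma drop_sum (x : List Int) (a : Nat) :
    (x.drop a).sum = x.sum - (x.take a).sum := by
  have := List.sum_take_add_sum_drop x a
  omega

lemma pre_fold (x : List Int) : ∀ (p : List Int) (c : Int), p.getLast? = some c →
    x.foldl (fun p v => p ++ [(PySem.List.pyGet? p (-1)).getD 0 + v]) p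
      = p ++ (List.range x.length).map (fun i => c + (x.take (i+1)).sum) := by
  induction x with
  | nil => intro p c _; simp
  | cons v t ih =>
    intro p c hc
    have h1 : (PySem.List.pyGet? p (-1)).getD 0 = c := by
      rw [PySem.List.pyGet?_neg_one, hc]; rfl
    simp only [List.foldl_cons, h1]
    rw [ih (p ++ [c + v]) (c + v) (by simp)]
    simp only [List.length_cons, List.range_succ_eq_map, List.map_cons, List.map_map]
    simp [Function.comp, List.take_succ_cons, add_assoc, add_comm, add_left_comm]

lemma pre_eq (x : List Int) :
    x.foldl (fun p v => p ++ [(PySem.List.pyGet? p (-1)).getD 0 + v]) [0]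
      = (List.range (x.length + 1)).map (fun i => ((x.take i).sum : Int)) := by
  rw [pre_fold x [0] 0 (by simp)]
  simp only [List.range_succ_eq_map, List.map_cons, List.map_map]
  simp [Function.comp]

lemma pre_get (x : List Int) (i : Int) (h0 : 0 ≤ i) (h1 : i ≤ (x.length : Int)) :
    (PySem.List.pyGet? (x.foldl (fun p v => p ++ [(PySem.List.pyGet? p (-1)).getD 0 + v]) [0]) i).getD 0
      = ((x.take i.toNat).sum : Int) := by
  rw [pre_eq, PySem.List.pyGet?_of_nonneg _ h0, List.getElem?_map,
      List.getElem?_range (by omega : i.toNat < x.length + 1)]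
  rfl

lemma rems_eq (x : List Int) (h : 4 ≤ x.length) :
    ((PySem.List.pyRange 0 ((x.length : Int) - 2) 1).map (fun i =>
        (PySem.List.pyGet? (x.foldl (fun p v => p ++ [(PySem.List.pyGet? p (-1)).getD 0 + v]) [0]) (x.length : Int)).getD 0
          - (PySem.List.pyGet? (x.foldl (fun p v => p ++ [(PySem.List.pyGet? p (-1)).getD 0 + v]) [0]) (i + 3)).getD 0
          + (PySem.List.pyGet? (x.foldl (fun p v => p ++ [(PySem.List.pyGet? p (-1)).getD 0 + v]) [0]) i).getD 0))
      ++ [(PySem.List.pyGet? (x.foldl (fun p v => p ++ [(PySem.List.pyGet? p (-1)).getD 0 + v]) [0]) ((x.length : Int) - 2)).getD 0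
            - (PySem.List.pyGet? (x.foldl (fun p v => p ++ [(PySem.List.pyGet? p (-1)).getD 0 + v]) [0]) 1).getD 0]
      ++ [(PySem.List.pyGet? (x.foldl (fun p v => p ++ [(PySem.List.pyGet? p (-1)).getD 0 + v]) [0]) ((x.length : Int) - 1)).getD 0
            - (PySem.List.pyGet? (x.foldl (fun p v => p ++ [(PySem.List.pyGet? p (-1)).getD 0 + v]) [0]) 2).getD 0]
    = ((PySem.List.pyRange 0 (x.length : Int) 1).map (fun i =>
        if i = (x.length : Int) - 2 then PySem.List.slice x (some 1) (some i)
        else if i = (x.length : Int) - 1 then PySem.List.slice x (some 2) (some i)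
        else PySem.List.slice x none (some i) ++ PySem.List.slice x (some (i + 3)) none)).map List.sum := by
  rw [List.map_map]
  rw [PySem.List.pyRange_one_append 0 ((x.length : Int) - 2) (x.length : Int) (by omega) (by omega),
      List.map_append]
  rw [PySem.List.pyRange_one_cons (by omega : (x.length : Int) - 2 < (x.length : Int))]
  rw [show (x.length : Int) - 2 + 1 = (x.length : Int) - 1 by ring]
  rw [PySem.List.pyRange_one_cons (by omega : (x.length : Int) - 1 < (x.length : Int))]
  rw [show (x.length : Int) - 1 + 1 = (x.length : Int) by ring]
  rw [PySem.List.pyRange_one_eq_nil (le_refl (x.length : Int))]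
  have hmap : ∀ i ∈ PySem.List.pyRange 0 ((x.length : Int) - 2) 1,
      (PySem.List.pyGet? (x.foldl (fun p v => p ++ [(PySem.List.pyGet? p (-1)).getD 0 + v]) [0]) (x.length : Int)).getD 0
        - (PySem.List.pyGet? (x.foldl (fun p v => p ++ [(PySem.List.pyGet? p (-1)).getD 0 + v]) [0]) (i + 3)).getD 0
        + (PySem.List.pyGet? (x.foldl (fun p v => p ++ [(PySem.List.pyGet? p (-1)).getD 0 + v]) [0]) i).getD 0
      = (List.sum ∘ fun i =>
          if i = (x.length : Int) - 2 then PySem.List.slice x (some 1) (some i)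
          else if i = (x.length : Int) - 1 then PySem.List.slice x (some 2) (some i)
          else PySem.List.slice x none (some i) ++ PySem.List.slice x (some (i + 3)) none) i := by
    intro i hi
    rw [PySem.List.mem_pyRange_one] at hi
    obtain ⟨hi0, hi1⟩ := hi
    simp only [Function.comp]
    rw [if_neg (by omega), if_neg (by omega), List.sum_append,
        PySem.List.slice_to _ hi0, PySem.List.slice_from _ (by omega : (0:Int) ≤ i + 3),
        drop_sum,
        pre_get x (x.length : Int) (by omega) (by omega),
        pre_get x (i + 3) (by omega) (by omega),
        pre_get x i (by omega) (by omega)]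
    simp only [Int.toNat_natCast, List.take_length]
    ring
  have h2 : (List.sum ∘ fun i =>
      if i = (x.length : Int) - 2 then PySem.List.slice x (some 1) (some i)
      else if i = (x.length : Int) - 1 then PySem.List.slice x (some 2) (some i)
      else PySem.List.slice x none (some i) ++ PySem.List.slice x (some (i + 3)) none) ((x.length : Int) - 2)
      = (PySem.List.pyGet? (x.foldl (fun p v => p ++ [(PySem.List.pyGet? p (-1)).getD 0 + v]) [0]) ((x.length : Int) - 2)).getD 0
          - (PySem.List.pyGet? (x.foldl (fun p v => p ++ [(PySem.List.pyGet? p (-1)).getD 0 + v]) [0]) 1).getD 0 := by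
    rw [Function.comp_apply, if_pos rfl,
        PySem.List.slice_of_nonneg _ (by norm_num) (by omega)]
    rw [show ((x.length : Int) - 2).toNat = x.length - 2 by omega,
        show ((1 : Int)).toNat = 1 by rfl]
    rw [seg_sum x 1 (x.length - 2) (by omega)]
    rw [pre_get x ((x.length : Int) - 2) (by omega) (by omega),
        pre_get x 1 (by omega) (by omega)]
    rw [show ((x.length : Int) - 2).toNat = x.length - 2 by omega,
        show ((1 : Int)).toNat = 1 by rfl]
    all_goals omega
  have h3 : (List.sum ∘ fun i =>
      if i = (x.length : Int) - 2 then PySem.List.slice x (some 1) (some i)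
      else if i = (x.length : Int) - 1 then PySem.List.slice x (some 2) (some i)
      else PySem.List.slice x none (some i) ++ PySem.List.slice x (some (i + 3)) none) ((x.length : Int) - 1)
      = (PySem.List.pyGet? (x.foldl (fun p v => p ++ [(PySem.List.pyGet? p (-1)).getD 0 + v]) [0]) ((x.length : Int) - 1)).getD 0
          - (PySem.List.pyGet? (x.foldl (fun p v => p ++ [(PySem.List.pyGet? p (-1)).getD 0 + v]) [0]) 2).getD 0 := by
    rw [Function.comp_apply, if_neg (by omega), if_pos rfl,
        PySem.List.slice_of_nonneg _ (by norm_num) (by omega)]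
    rw [show ((x.length : Int) - 1).toNat = x.length - 1 by omega,
        show ((2 : Int)).toNat = 2 by rfl]
    rw [seg_sum x 2 (x.length - 1) (by omega)]
    rw [pre_get x ((x.length : Int) - 1) (by omega) (by omega),
        pre_get x 2 (by omega) (by omega)]
    rw [show ((x.length : Int) - 1).toNat = x.length - 1 by omega,
        show ((2 : Int)).toNat = 2 by rfl]
    all_goals omega
  rw [List.map_congr_left hmap]
  simp only [List.map_cons, List.map_nil, List.append_assoc]
  rw [h2, h3]
  simp

lemma pick_eq (x : List Int) (h : 4 ≤ x.length) :
    (if ((((PySem.List.index? (((PySem.List.pyRange 0 (x.length : Int) 1).map (fun i =>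
      if i = (x.length : Int) - 2 then PySem.List.slice x (some 1) (some i)
      else if i = (x.length : Int) - 1 then PySem.List.slice x (some 2) (some i)
      else PySem.List.slice x none (some i) ++ PySem.List.slice x (some (i + 3)) none)).map List.sum) ((PySem.List.min? (((PySem.List.pyRange 0 (x.length : Int) 1).map (fun i =>
      if i = (x.length : Int) - 2 then PySem.List.slice x (some 1) (some i)
      else if i = (x.length : Int) - 1 then PySem.List.slice x (some 2) (some i)
      else PySem.List.slice x none (some i) ++ PySem.List.slice x (some (i + 3)) none)).map List.sum) (fun v => v)).getD 0)).getD 0) : Nat) : Int) ≤ (x.length : Int) - 3 then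
        PySem.List.slice x none (some ((((PySem.List.index? (((PySem.List.pyRange 0 (x.length : Int) 1).map (fun i =>
      if i = (x.length : Int) - 2 then PySem.List.slice x (some 1) (some i)
      else if i = (x.length : Int) - 1 then PySem.List.slice x (some 2) (some i)
      else PySem.List.slice x none (some i) ++ PySem.List.slice x (some (i + 3)) none)).map List.sum) ((PySem.List.min? (((PySem.List.pyRange 0 (x.length : Int) 1).map (fun i =>
      if i = (x.length : Int) - 2 then PySem.List.slice x (some 1) (some i)
      else if i = (x.length : Int) - 1 then PySem.List.slice x (some 2) (some i)
      else PySem.List.slice x none (some i) ++ PySem.List.slice x (some (i + 3)) none)).map List.sum) (fun v => v)).getD 0)).getD 0) : Nat) : Int)) ++ PySem.List.slice x (some (((((PySem.List.index? (((PySem.List.pyRange 0 (x.length : Int) 1).map (fun i =>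
      if i = (x.length : Int) - 2 then PySem.List.slice x (some 1) (some i)
      else if i = (x.length : Int) - 1 then PySem.List.slice x (some 2) (some i)
      else PySem.List.slice x none (some i) ++ PySem.List.slice x (some (i + 3)) none)).map List.sum) ((PySem.List.min? (((PySem.List.pyRange 0 (x.length : Int) 1).map (fun i =>
      if i = (x.length : Int) - 2 then PySem.List.slice x (some 1) (some i)
      else if i = (x.length : Int) - 1 then PySem.List.slice x (some 2) (some i)
      else PySem.List.slice x none (some i) ++ PySem.List.slice x (some (i + 3)) none)).map List.sum) (fun v => v)).getD 0)).getD 0) : Nat) : Int) + 3)) none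
      else if ((((PySem.List.index? (((PySem.List.pyRange 0 (x.length : Int) 1).map (fun i =>
      if i = (x.length : Int) - 2 then PySem.List.slice x (some 1) (some i)
      else if i = (x.length : Int) - 1 then PySem.List.slice x (some 2) (some i)
      else PySem.List.slice x none (some i) ++ PySem.List.slice x (some (i + 3)) none)).map List.sum) ((PySem.List.min? (((PySem.List.pyRange 0 (x.length : Int) 1).map (fun i =>
      if i = (x.length : Int) - 2 then PySem.List.slice x (some 1) (some i)
      else if i = (x.length : Int) - 1 then PySem.List.slice x (some 2) (some i)
      else PySem.List.slice x none (some i) ++ PySem.List.slice x (some (i + 3)) none)).map List.sum) (fun v => v)).getD 0)).getD 0) : Nat) : Int) = (x.length : Int) - 2 then PySem.List.slice x (some 1) (some ((((PySem.List.index? (((PySem.List.pyRange 0 (x.length : Int) 1).map (fun i =>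
      if i = (x.length : Int) - 2 then PySem.List.slice x (some 1) (some i)
      else if i = (x.length : Int) - 1 then PySem.List.slice x (some 2) (some i)
      else PySem.List.slice x none (some i) ++ PySem.List.slice x (some (i + 3)) none)).map List.sum) ((PySem.List.min? (((PySem.List.pyRange 0 (x.length : Int) 1).map (fun i =>
      if i = (x.length : Int) - 2 then PySem.List.slice x (some 1) (some i)
      else if i = (x.length : Int) - 1 then PySem.List.slice x (some 2) (some i)
      else PySem.List.slice x none (some i) ++ PySem.List.slice x (some (i + 3)) none)).map List.sum) (fun v => v)).getD 0)).getD 0) : Nat) : Int))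
      else PySem.List.slice x (some 2) (some ((((PySem.List.index? (((PySem.List.pyRange 0 (x.length : Int) 1).map (fun i =>
      if i = (x.length : Int) - 2 then PySem.List.slice x (some 1) (some i)
      else if i = (x.length : Int) - 1 then PySem.List.slice x (some 2) (some i)
      else PySem.List.slice x none (some i) ++ PySem.List.slice x (some (i + 3)) none)).map List.sum) ((PySem.List.min? (((PySem.List.pyRange 0 (x.length : Int) 1).map (fun i =>
      if i = (x.length : Int) - 2 then PySem.List.slice x (some 1) (some i)
      else if i = (x.length : Int) - 1 then PySem.List.slice x (some 2) (some i)
      else PySem.List.slice x none (some i) ++ PySem.List.slice x (some (i + 3)) none)).map List.sum) (fun v => v)).getD 0)).getD 0) : Nat) : Int)))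
    = (PySem.List.pyGet? ((PySem.List.pyRange 0 (x.length : Int) 1).map (fun i =>
      if i = (x.length : Int) - 2 then PySem.List.slice x (some 1) (some i)
      else if i = (x.length : Int) - 1 then PySem.List.slice x (some 2) (some i)
      else PySem.List.slice x none (some i) ++ PySem.List.slice x (some (i + 3)) none)) ((((PySem.List.index? (((PySem.List.pyRange 0 (x.length : Int) 1).map (fun i =>
      if i = (x.length : Int) - 2 then PySem.List.slice x (some 1) (some i)
      else if i = (x.length : Int) - 1 then PySem.List.slice x (some 2) (some i)
      else PySem.List.slice x none (some i) ++ PySem.List.slice x (some (i + 3)) none)).map List.sum) ((PySem.List.min? (((PySem.List.pyRange 0 (x.length : Int) 1).map (fun i =>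
      if i = (x.length : Int) - 2 then PySem.List.slice x (some 1) (some i)
      else if i = (x.length : Int) - 1 then PySem.List.slice x (some 2) (some i)
      else PySem.List.slice x none (some i) ++ PySem.List.slice x (some (i + 3)) none)).map List.sum) (fun v => v)).getD 0)).getD 0) : Nat) : Int)).getD [] := by
  have hlenTS : (((PySem.List.pyRange 0 (x.length : Int) 1).map (fun i =>
      if i = (x.length : Int) - 2 then PySem.List.slice x (some 1) (some i)
      else if i = (x.length : Int) - 1 then PySem.List.slice x (some 2) (some i)
      else PySem.List.slice x none (some i) ++ PySem.List.slice x (some (i + 3)) none)).map List.sum).length = x.length := by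
    rw [List.length_map, List.length_map, PySem.List.length_pyRange_one]; omega
  have hne : (((PySem.List.pyRange 0 (x.length : Int) 1).map (fun i =>
      if i = (x.length : Int) - 2 then PySem.List.slice x (some 1) (some i)
      else if i = (x.length : Int) - 1 then PySem.List.slice x (some 2) (some i)
      else PySem.List.slice x none (some i) ++ PySem.List.slice x (some (i + 3)) none)).map List.sum) ≠ [] := by
    intro h0
    rw [h0] at hlenTS
    simp at hlenTS
    omega
  obtain ⟨m0, hm0⟩ : ∃ m0, PySem.List.min? (((PySem.List.pyRange 0 (x.length : Int) 1).map (fun i =>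
      if i = (x.length : Int) - 2 then PySem.List.slice x (some 1) (some i)
      else if i = (x.length : Int) - 1 then PySem.List.slice x (some 2) (some i)
      else PySem.List.slice x none (some i) ++ PySem.List.slice x (some (i + 3)) none)).map List.sum) (fun v => v) = some m0 := by
    cases hc : PySem.List.min? (((PySem.List.pyRange 0 (x.length : Int) 1).map (fun i =>
      if i = (x.length : Int) - 2 then PySem.List.slice x (some 1) (some i)
      else if i = (x.length : Int) - 1 then PySem.List.slice x (some 2) (some i)
      else PySem.List.slice x none (some i) ++ PySem.List.slice x (some (i + 3)) none)).map List.sum) (fun v => v) with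
    | none => exact absurd ((PySem.List.min?_eq_none_iff _ _).mp hc) hne
    | some m0 => exact ⟨m0, rfl⟩
  have hmem : m0 ∈ (((PySem.List.pyRange 0 (x.length : Int) 1).map (fun i =>
      if i = (x.length : Int) - 2 then PySem.List.slice x (some 1) (some i)
      else if i = (x.length : Int) - 1 then PySem.List.slice x (some 2) (some i)
      else PySem.List.slice x none (some i) ++ PySem.List.slice x (some (i + 3)) none)).map List.sum) := PySem.List.min?_mem hm0
  obtain ⟨j0, hj0⟩ : ∃ j0, PySem.List.index? (((PySem.List.pyRange 0 (x.length : Int) 1).map (fun i =>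
      if i = (x.length : Int) - 2 then PySem.List.slice x (some 1) (some i)
      else if i = (x.length : Int) - 1 then PySem.List.slice x (some 2) (some i)
      else PySem.List.slice x none (some i) ++ PySem.List.slice x (some (i + 3)) none)).map List.sum) m0 = some j0 :=
    Option.isSome_iff_exists.mp ((PySem.List.index?_isSome_iff _ _).mpr hmem)
  obtain ⟨hjlt, -⟩ := PySem.List.getElem_of_index?_eq_some hj0
  rw [hlenTS] at hjlt
  rw [hm0]
  simp only [Option.getD_some]
  rw [hj0]
  simp only [Option.getD_some]
  rw [PySem.List.pyGet?_natCast]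
  rw [PySem.List.getElem?_map_pyRange_zero _ _ _ hjlt]
  simp only [Option.getD_some]
  split_ifs <;> first | rfl | omega

theorem go_eq (f : Nat) : ∀ (x : List Int) (acc : Int), damageBGo f x acc = acc + damageAGo f x := by
  induction f with
  | zero => intro x acc; simp [damageAGo, damageBGo]
  | succ f ih =>
    intro x acc
    by_cases h : x.length ≤ 3
    · simp [damageAGo, damageBGo, if_pos h]
    · simp only [damageAGo, damageBGo, if_neg h]
      rw [rems_eq x (by omega)]
      rw [pick_eq x (by omega)]
      rw [ih]
      ring

-- ===== VERDICT (by name: the statement is the Claim_ definition above) =====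
theorem damage_spec : Claim_equal_damage := by
  intro x _
  unfold Spec_damage damage damage_alt
  rw [go_eq]
  ring
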